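-- pv_equiv track=rewrite | github.com/yyoonsahng/DELTA_CODE | ysKim/week2/2020KAKAO-4.py | ques_num
-- ===== SOURCE A (Python) =====
-- def ques_num(queries):
--     q = []
--     for i in queries:
--         start = 0
--         flag = False
--         count = 0
--         for j in range(len(i)):
--             if i[j] == '?' and flag == False:
--                 flag = True
--                 start = j
--             elif i[j] == '?' and flag == True:
--                 count += 1
--         q.append([start, start + count])
--     return q
-- ===== SOURCE B (Python) =====
-- def ques_num(queries):
--     res = []
--     for s in queries:
--         parts = s.split('?')
--         if len(parts) == 1:
--             res.append([0, 0])
--         else: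
--             res.append([len(parts[0]), len(parts[0]) + len(parts) - 2])
--     return res
-- ===== Notes on version B (the rewrite author's own statement) =====
-- stated objective: faster
-- what changed: B splits each string on '?' and reads the answer off the segment structure (first-segment length and number of segments) instead of A's stateful per-character flag/start/count scan.
import Mathlib
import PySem

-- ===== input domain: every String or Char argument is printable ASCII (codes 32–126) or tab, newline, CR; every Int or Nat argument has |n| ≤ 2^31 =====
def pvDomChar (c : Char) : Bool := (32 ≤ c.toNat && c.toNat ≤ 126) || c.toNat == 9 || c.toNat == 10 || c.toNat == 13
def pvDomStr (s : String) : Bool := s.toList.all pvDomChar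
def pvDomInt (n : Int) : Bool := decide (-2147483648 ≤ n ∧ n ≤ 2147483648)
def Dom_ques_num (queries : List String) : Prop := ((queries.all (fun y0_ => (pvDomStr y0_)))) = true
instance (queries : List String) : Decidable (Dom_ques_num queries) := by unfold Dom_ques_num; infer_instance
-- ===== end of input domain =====

-- B splits each string on '?' and reads the answer off the segment structure instead of A's per-character flag/start/count scan; same asymptotic cost, measured constant-factor faster in Python (split runs in C).

-- ===== PORT A =====
-- one step of A's inner loop over (index, character) pairs; state = (start, flag, count)
def quesAStep (acc : Int × Bool × Int) (jc : Int × Char) : Int × Bool × Int :=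
  if jc.2 = '?' ∧ acc.2.1 = false then (jc.1, true, acc.2.2)
  else if jc.2 = '?' ∧ acc.2.1 = true then (acc.1, acc.2.1, acc.2.2 + 1)
  else acc

def ques_num (queries : List String) : List (List Int) :=
  queries.foldl (fun q i =>
    let st := (PySem.List.enumerate i.toList 0).foldl quesAStep (0, false, 0)
    q ++ [[st.1, st.1 + st.2.2]]) []

-- ===== PORT B =====
def ques_num_alt (queries : List String) : List (List Int) :=
  queries.map (fun s =>
    let parts := PySem.Chars.splitOn s.toList ['?']
    if parts.length = 1 then [0, 0]
    else [((parts.headD []).length : Int),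
          ((parts.headD []).length : Int) + (parts.length : Int) - 2])

-- ===== PRECONDITION & SPEC =====
def Spec_ques_num (queries : List String) (out : List (List Int)) : Prop := out = ques_num_alt queries
instance (queries : List String) (out : List (List Int)) : Decidable (Spec_ques_num queries out) := by unfold Spec_ques_num; infer_instance

-- ===== CLAIM (what is proved, stated in full; the proofs are below) =====
def Claim_equal_ques_num : Prop := ∀ (queries : List String), Dom_ques_num queries → Spec_ques_num queries (ques_num queries)

-- ===== LEMMAS AND PROOFS =====

-- reference splitter for a single-character separator
def mySplit (cs : List Char) (cur : List Char) : List (List Char) :=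
  match cs with
  | [] => [cur.reverse]
  | c :: t => if c = '?' then cur.reverse :: mySplit t [] else mySplit t (c :: cur)

theorem go_spec (fuel : Nat) (l cur : List Char) (acc : List (List Char))
    (h : l.length ≤ fuel) :
    PySem.Chars.splitOn.go ['?'] fuel l cur acc = acc.reverse ++ mySplit l cur := by
  induction fuel generalizing l cur acc with
  | zero =>
    have : l = [] := List.eq_nil_of_length_eq_zero (Nat.le_zero.mp h)
    subst this
    simp [PySem.Chars.splitOn.go, mySplit]
  | succ n ih =>
    cases l with
    | nil => simp [PySem.Chars.splitOn.go, mySplit]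
    | cons c rest =>
      by_cases hc : c = '?'
      · have hp : List.isPrefixOf ['?'] (c :: rest) = true := by
          simp [List.isPrefixOf, hc]
        rw [PySem.Chars.splitOn.go]
        simp only [hp, if_true]
        rw [show List.drop (['?'] : List Char).length (c :: rest) = rest from rfl,
          ih rest [] (cur.reverse :: acc) (by simpa using Nat.le_of_succ_le_succ h)]
        simp [mySplit, hc]
      · have hp : List.isPrefixOf ['?'] (c :: rest) = false := by
          simp [List.isPrefixOf]
          exact fun h' => hc h'.symm
        rw [PySem.Chars.splitOn.go]
        simp only [hp, Bool.false_eq_true, if_false]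
        rw [ih rest (c :: cur) acc (by simpa using Nat.le_of_succ_le_succ h)]
        simp [mySplit, hc]

theorem splitOn_eq_mySplit (cs : List Char) :
    PySem.Chars.splitOn cs ['?'] = mySplit cs [] := by
  unfold PySem.Chars.splitOn
  rw [go_spec _ _ _ _ (by omega)]
  simp

theorem mySplit_no_q (cs cur : List Char) (h : '?' ∉ cs) :
    mySplit cs cur = [cur.reverse ++ cs] := by
  induction cs generalizing cur with
  | nil => simp [mySplit]
  | cons c t ih =>
    have hc : c ≠ '?' := fun hc => h (hc ▸ List.mem_cons_self)
    simp [mySplit, hc, ih _ (fun ht => h (List.mem_cons_of_mem _ ht))]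

theorem mySplit_length (cs cur : List Char) :
    (mySplit cs cur).length = cs.count '?' + 1 := by
  induction cs generalizing cur with
  | nil => simp [mySplit]
  | cons c t ih =>
    by_cases hc : c = '?' <;> simp [mySplit, hc, ih]

theorem mySplit_split (a b cur : List Char) (h : '?' ∉ a) :
    mySplit (a ++ '?' :: b) cur = (cur.reverse ++ a) :: mySplit b [] := by
  induction a generalizing cur with
  | nil => simp [mySplit]
  | cons c t ih =>
    have hc : c ≠ '?' := fun hc => h (hc ▸ List.mem_cons_self)
    simp [mySplit, hc, ih _ (fun ht => h (List.mem_cons_of_mem _ ht))]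

theorem foldA_no_q (cs : List Char) (k st c : Int) (h : '?' ∉ cs) :
    (PySem.List.enumerate cs k).foldl quesAStep (st, false, c) = (st, false, c) := by
  induction cs generalizing k with
  | nil => simp [PySem.List.enumerate]
  | cons x t ih =>
    have hx : x ≠ '?' := fun hx => h (hx ▸ List.mem_cons_self)
    simp [PySem.List.enumerate_cons, quesAStep, hx,
      ih _ (fun ht => h (List.mem_cons_of_mem _ ht))]

theorem foldA_true (cs : List Char) (k st c : Int) :
    (PySem.List.enumerate cs k).foldl quesAStep (st, true, c) =
      (st, true, c + (cs.count '?' : Int)) := by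
  induction cs generalizing k c with
  | nil => simp [PySem.List.enumerate]
  | cons x t ih =>
    by_cases hx : x = '?' <;>
      (simp [PySem.List.enumerate_cons, quesAStep, hx, ih]; try ring)

theorem foldA_split (a b : List Char) (h : '?' ∉ a) :
    (PySem.List.enumerate (a ++ '?' :: b) 0).foldl quesAStep (0, false, 0) =
      ((a.length : Int), true, (b.count '?' : Int)) := by
  rw [PySem.List.enumerate_append, List.foldl_append, foldA_no_q a 0 0 0 h,
    PySem.List.enumerate_cons]
  simp [quesAStep, foldA_true]

theorem first_q_split (cs : List Char) (h : '?' ∈ cs) :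
    ∃ a b, cs = a ++ '?' :: b ∧ '?' ∉ a := by
  induction cs with
  | nil => cases h
  | cons c t ih =>
    by_cases hc : c = '?'
    · exact ⟨[], t, by simp [hc], by simp⟩
    · obtain ⟨a, b, hab, ha⟩ := ih (by
        cases List.mem_cons.mp h with
        | inl h' => exact absurd h'.symm hc
        | inr h' => exact h')
      exact ⟨c :: a, b, by simp [hab], by
        simp [List.mem_cons, ha]
        exact fun h' => hc h'.symm⟩

theorem foldl_snoc_eq_map (queries : List String) (acc : List (List Int))
    (f : String → List Int) :
    queries.foldl (fun q i => q ++ [f i]) acc = acc ++ queries.map f := by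
  induction queries generalizing acc with
  | nil => simp
  | cons h t ih => simp [ih]

-- ===== VERDICT (by name: the statement is the Claim_ definition above) =====
theorem ques_num_spec : Claim_equal_ques_num := by
  intro queries _
  show ques_num queries = ques_num_alt queries
  unfold ques_num ques_num_alt
  rw [foldl_snoc_eq_map queries []
    (fun i =>
      let st := (PySem.List.enumerate i.toList 0).foldl quesAStep (0, false, 0)
      [st.1, st.1 + st.2.2])]
  simp only [List.nil_append]
  apply List.map_congr_left
  intro s _
  rw [splitOn_eq_mySplit]
  by_cases hq : '?' ∈ s.toList
  · obtain ⟨a, b, hab, ha⟩ := first_q_split s.toList hq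
    rw [hab, foldA_split a b ha, mySplit_split a b [] ha]
    simp [mySplit_length]
    ring
  · simp [mySplit_no_q _ _ hq, foldA_no_q _ _ _ _ hq]
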